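-- pv_equiv track=rewrite | github.com/chwilko/WeirdText | WeridText.py | to_code
-- ===== SOURCE A (Python) =====
-- def to_code(word):
--     if len(word) < 4:
--         return False
--     word = word[1:-1]
--     for i in range(len(word) - 1):
--         if word[i] != word[i + 1]:
--             return True
--     return False
-- ===== SOURCE B (Python) =====
-- def to_code(word):
--     if len(word) < 4:
--         return False
--     return len(set(word[1:-1])) != 1
-- ===== Notes on version B (the rewrite author's own statement) =====
-- stated objective: simpler
-- what changed: replaces the index loop over adjacent character pairs with early exit by a single set-cardinality test on the middle substring (all middle chars identical iff the set has size 1)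
import Mathlib
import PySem

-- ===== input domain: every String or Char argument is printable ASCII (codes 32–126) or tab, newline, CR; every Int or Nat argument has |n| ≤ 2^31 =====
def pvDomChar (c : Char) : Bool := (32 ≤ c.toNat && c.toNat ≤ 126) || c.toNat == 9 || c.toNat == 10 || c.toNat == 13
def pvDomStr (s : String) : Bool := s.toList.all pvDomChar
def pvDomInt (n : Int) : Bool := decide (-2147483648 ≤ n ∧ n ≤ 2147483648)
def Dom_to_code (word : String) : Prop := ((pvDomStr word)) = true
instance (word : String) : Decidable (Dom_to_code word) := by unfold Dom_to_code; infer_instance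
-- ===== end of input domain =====

-- B replaces A's index loop over adjacent character pairs (with early exit) by a single
-- set-cardinality test on the middle substring: all middle chars identical iff the set has size 1.


-- ===== PORT A =====
-- literal port of A: guard len(word) < 4; word = word[1:-1]; for i in range(len(word)-1):
-- early return True on word[i] != word[i+1] (folded as Bool-or); else return False
def to_code (word : String) : Bool :=
  if PySem.Str.len word < 4 then false
  else
    let w := PySem.List.slice word.toList (some 1) (some (-1))
    (PySem.List.pyRange 0 ((w.length : Int) - 1) 1).foldl
      (fun acc i =>
        acc || decide (PySem.List.pyGetD w i 'a' ≠ PySem.List.pyGetD w (i + 1) 'a')) false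

-- ===== PORT B =====
-- port of Source B: guard len(word) < 4; then len(set(word[1:-1])) != 1
def to_code_alt (word : String) : Bool :=
  if PySem.Str.len word < 4 then false
  else decide (PySem.Set.len (PySem.Set.ofList (PySem.List.slice word.toList (some 1) (some (-1)))) ≠ 1)

-- ===== PRECONDITION & SPEC =====
def Spec_to_code (word : String) (out : Bool) : Prop := out = to_code_alt word
instance (word : String) (out : Bool) : Decidable (Spec_to_code word out) := by unfold Spec_to_code; infer_instance

-- ===== CLAIM (what is proved, stated in full; the proofs are below) =====
def Claim_equal_to_code : Prop := ∀ (word : String), Dom_to_code word → Spec_to_code word (to_code word)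

-- ===== LEMMAS AND PROOFS =====

-- a foldl with Bool-or accumulator is `any`
theorem foldl_or_any {α : Type} (l : List α) (p : α → Bool) (b : Bool) :
    l.foldl (fun acc x => acc || p x) b = (b || l.any p) := by
  induction l generalizing b with
  | nil => simp
  | cons x t ih => simp [List.foldl, ih, Bool.or_assoc]

-- the adjacent-pair scan over a::t finds a difference iff some element of t differs from a
theorem anyAdj_iff (a : Char) (t : List Char) :
    ((List.range ((a :: t).length - 1)).any
        (fun k => decide ((a :: t).getD k 'a' ≠ (a :: t).getD (k + 1) 'a')) = true)
      ↔ ∃ x ∈ t, x ≠ a := by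
  induction t generalizing a with
  | nil => simp
  | cons b t' ih =>
    rw [show (a :: b :: t').length - 1 = ((b :: t').length - 1) + 1 by simp,
        List.range_succ_eq_map]
    simp only [List.any_cons, List.any_map, Bool.or_eq_true]
    by_cases hab : a = b
    · subst hab
      constructor
      · rintro (h | h)
        · simp at h
        · rcases (ih a).mp (by simpa [Function.comp] using h) with ⟨x, hx, hxa⟩
          exact ⟨x, by simp [hx], hxa⟩
      · rintro ⟨x, hx, hxa⟩
        rcases List.mem_cons.mp hx with rfl | hx
        · exact absurd rfl hxa
        · exact Or.inr (by simpa [Function.comp] using (ih a).mpr ⟨x, hx, hxa⟩)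
    · constructor
      · intro _; exact ⟨b, by simp, fun h => hab h.symm⟩
      · intro _
        left
        simpa using hab

-- a Python set has one element iff its source list is a nonempty constant list
theorem ofList_length_one_iff (a : Char) (t : List Char) :
    (PySem.Set.ofList (a :: t)).length = 1 ↔ ∀ x ∈ t, x = a := by
  constructor
  · intro h
    rcases List.length_eq_one_iff.mp h with ⟨c, hc⟩
    have ha : a ∈ PySem.Set.ofList (a :: t) := (PySem.Set.mem_ofList _ _).mpr (by simp)
    rw [hc] at ha
    have hca : c = a := (List.mem_singleton.mp ha).symm
    intro x hx
    have hxm : x ∈ PySem.Set.ofList (a :: t) := (PySem.Set.mem_ofList _ _).mpr (by simp [hx])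
    rw [hc, hca] at hxm
    exact List.mem_singleton.mp hxm
  · intro hall
    have hmem : ∀ y ∈ PySem.Set.ofList (a :: t), y = a := by
      intro y hy
      rcases List.mem_cons.mp ((PySem.Set.mem_ofList _ _).mp hy) with rfl | h
      · rfl
      · exact hall y h
    have hnd : (PySem.Set.ofList (a :: t)).Nodup := PySem.Set.nodup_ofList _
    have ha : a ∈ PySem.Set.ofList (a :: t) := (PySem.Set.mem_ofList _ _).mpr (by simp)
    rcases hs : PySem.Set.ofList (a :: t) with _ | ⟨c, rest⟩
    · rw [hs] at ha; simp at ha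
    · rw [hs] at hmem hnd
      have hca : c = a := hmem c (by simp)
      have hrest : rest = [] := by
        cases rest with
        | nil => rfl
        | cons d r =>
          have hd : d = a := hmem d (by simp)
          exact absurd (by simp [hca, hd]) (List.nodup_cons.mp hnd).1
      simp [hrest]

-- A's scan over the middle list equals B's set-size test, for any nonempty middle list
theorem scan_eq_set (m : List Char) (hm : 1 ≤ m.length) :
    ((PySem.List.pyRange 0 ((m.length : Int) - 1) 1).foldl
        (fun acc i =>
          acc || decide (PySem.List.pyGetD m i 'a' ≠ PySem.List.pyGetD m (i + 1) 'a')) false)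
      = decide (PySem.Set.len (PySem.Set.ofList m) ≠ 1) := by
  rcases m with _ | ⟨a, t⟩
  · simp at hm
  · have hn : (((a :: t).length : Int) - 1) = ((t.length : Nat) : Int) := by
      simp
    rw [hn, PySem.List.pyRange_zero_natCast, foldl_or_any, List.any_map, Bool.false_or,
        Bool.eq_iff_iff]
    have hcg : ((List.range t.length).any
          ((fun i => decide (PySem.List.pyGetD (a :: t) i 'a'
              ≠ PySem.List.pyGetD (a :: t) (i + 1) 'a')) ∘ (fun k => (k : Int))))
        = ((List.range ((a :: t).length - 1)).any
            (fun k => decide ((a :: t).getD k 'a' ≠ (a :: t).getD (k + 1) 'a'))) := by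
      simp only [List.length_cons, Nat.add_sub_cancel]
      apply List.any_congr rfl
      intro k
      simp only [Function.comp]
      have h1 : ((k : Int) + 1) = (((k + 1 : Nat) : Int)) := by push_cast; ring
      rw [h1, PySem.List.pyGetD_natCast, PySem.List.pyGetD_natCast]
    rw [hcg, anyAdj_iff]
    have hlen : PySem.Set.len (PySem.Set.ofList (a :: t))
        = ((PySem.Set.ofList (a :: t)).length : Int) := rfl
    rw [hlen]
    constructor
    · rintro ⟨x, hx, hxa⟩
      have h1 : (PySem.Set.ofList (a :: t)).length ≠ 1 := fun hone =>
        hxa ((ofList_length_one_iff a t).mp hone x hx)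
      simpa using fun hone => h1 (by exact_mod_cast hone)
    · intro h
      by_contra hno
      push Not at hno
      have h1 : (PySem.Set.ofList (a :: t)).length = 1 :=
        (ofList_length_one_iff a t).mpr hno
      simp at h
      exact h (by exact_mod_cast h1)

-- the middle slice word[1:-1] has length len(word) - 2
theorem slice_middle_length (xs : List Char) (h : 4 ≤ xs.length) :
    (PySem.List.slice xs (some 1) (some (-1))).length = xs.length - 2 := by
  rw [PySem.List.length_slice, PySem.List.clampIdx_neg_one]
  have h1 : PySem.List.clampIdx xs.length 1 = 1 := by
    simp [PySem.List.clampIdx]; omega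
  rw [h1]; omega

-- ===== VERDICT (by name: the statement is the Claim_ definition above) =====
theorem to_code_spec : Claim_equal_to_code := by
  intro word _
  unfold Spec_to_code to_code to_code_alt
  by_cases h : PySem.Str.len word < 4
  · rw [if_pos h, if_pos h]
  · rw [if_neg h, if_neg h]
    have hlen : 4 ≤ word.toList.length := by
      have := PySem.Str.len_eq word
      omega
    apply scan_eq_set
    rw [slice_middle_length word.toList hlen]
    omega
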